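-- pv_equiv track=rewrite | github.com/WritingHusky/TPRandoStuff | Generator/AccessParser.py | split_out_brackets
-- ===== SOURCE A (Python) =====
-- def split_out_brackets(rule: str) -> list[str]:
--     result = []
--     buffer = ""
--     i = 0
--     while i < len(rule):
--         char = rule[i]
--         if char in "()":
--             if buffer:
--                 result.append(buffer.strip())
--                 buffer = ""
--             result.append(char)
--         elif rule[i : i + 5] == " and ":
--             if buffer:
--                 result.append(buffer.strip())
--                 buffer = ""
--             result.append("and")
--             i += 4  # Skip the next four characters
--         elif rule[i : i + 4] == " or ":
--             if buffer:
--                 result.append(buffer.strip())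
--                 buffer = ""
--             result.append("or")
--             i += 3  # Skip the next three characters
--         else:
--             buffer += char
--         i += 1
--     if buffer:
--         result.append(buffer.strip())
--
--     # Process commas and remove surrounding brackets
--     for i in range(len(result)):
--         if "," in result[i]:
--             # Check if surrounded by brackets
--             if (
--                 i > 0
--                 and i < len(result) - 1
--                 and result[i - 1] == "("
--                 and result[i + 1] == ")"
--             ):
--                 # Remove the brackets
--                 result[i - 1] = ""
--                 result[i + 1] = ""
--
--     # Remove empty strings from the result
--     result = [x for x in result if x]
--     return result
-- ===== SOURCE B (Python) =====
-- def split_out_brackets(rule: str) -> list[str]: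
--     # Tokenize by repeatedly jumping to the leftmost delimiter occurrence
--     # (found with str.find) instead of scanning character by character.
--     delims = (("(", "("), (")", ")"), (" and ", "and"), (" or ", "or"))
--     result = []
--     rest = rule
--     while True:
--         best_p = -1
--         best = None
--         for d, tok in delims:
--             p = rest.find(d)
--             if p != -1 and (best is None or p < best_p):
--                 best_p = p
--                 best = (d, tok)
--         if best is None:
--             if rest:
--                 result.append(rest.strip())
--             break
--         d, tok = best
--         pre = rest[:best_p]
--         if pre:
--             result.append(pre.strip())
--         result.append(tok)
--         rest = rest[best_p + len(d):]
--
--     # Process commas and remove surrounding brackets (identical to the original)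
--     for i in range(len(result)):
--         if "," in result[i]:
--             if (
--                 i > 0
--                 and i < len(result) - 1
--                 and result[i - 1] == "("
--                 and result[i + 1] == ")"
--             ):
--                 result[i - 1] = ""
--                 result[i + 1] = ""
--
--     return [x for x in result if x]
-- ===== Notes on version B (the rewrite author's own statement) =====
-- stated objective: faster
-- what changed: B replaces A's character-by-character state machine with a buffer by a repeated leftmost-delimiter search (str.find over the four delimiters) that slices off the prefix token and jumps past each delimiter; the comma/bracket post-pass is kept identical.
import Mathlib
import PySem

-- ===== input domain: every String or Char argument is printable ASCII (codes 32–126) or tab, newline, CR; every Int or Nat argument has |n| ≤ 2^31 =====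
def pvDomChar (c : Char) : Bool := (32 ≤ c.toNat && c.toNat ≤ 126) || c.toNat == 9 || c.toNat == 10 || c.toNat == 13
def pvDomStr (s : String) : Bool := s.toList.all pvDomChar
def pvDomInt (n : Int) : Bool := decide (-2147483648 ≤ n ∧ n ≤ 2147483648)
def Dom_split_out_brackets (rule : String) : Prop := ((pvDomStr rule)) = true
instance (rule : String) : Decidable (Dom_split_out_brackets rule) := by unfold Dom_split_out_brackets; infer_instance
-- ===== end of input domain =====

-- B replaces A's character-by-character buffer state machine by a repeated leftmost-delimiter
-- search (str.find over the four delimiters); the comma/bracket post-pass is byte-identical in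
-- both sources, so it is defined once (pvCommaPass) and called by both ports.

-- ===== PORT A =====
-- shared second pass: "Process commas and remove surrounding brackets" (identical in Source A and Source B)
def pvCommaPass (res : List (List Char)) : List (List Char) :=
  (List.range res.length).foldl (fun r i =>
    if (r.getD i []).contains ',' then
      if 0 < i ∧ i < r.length - 1 ∧ r.getD (i - 1) [] = ['('] ∧ r.getD (i + 1) [] = [')'] then
        (r.set (i - 1) []).set (i + 1) []
      else r
    else r) res

-- A's while loop: i-indexed scan with a buffer, as structural recursion on the remaining suffix
def pvAloop : List Char → List Char → List (List Char) → List (List Char)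
  | [], buf, res => if buf = [] then res else res ++ [PySem.Chars.strip buf]
  | c :: rest, buf, res =>
    if c = '(' ∨ c = ')' then
      pvAloop rest [] ((if buf = [] then res else res ++ [PySem.Chars.strip buf]) ++ [[c]])
    else if List.take 5 (c :: rest) = [' ', 'a', 'n', 'd', ' '] then
      pvAloop (rest.drop 4) [] ((if buf = [] then res else res ++ [PySem.Chars.strip buf]) ++ [['a', 'n', 'd']])
    else if List.take 4 (c :: rest) = [' ', 'o', 'r', ' '] then
      pvAloop (rest.drop 3) [] ((if buf = [] then res else res ++ [PySem.Chars.strip buf]) ++ [['o', 'r']])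
    else
      pvAloop rest (buf ++ [c]) res
  termination_by rest _ _ => rest.length
  decreasing_by all_goals simp

def split_out_brackets (rule : String) : List String :=
  ((pvCommaPass (pvAloop rule.toList [] [])).filter (· ≠ [])).map String.ofList

-- ===== PORT B =====
def pvDelims : List (List Char × List Char) :=
  [(['('], ['(']), ([')'], [')']),
   ([' ', 'a', 'n', 'd', ' '], ['a', 'n', 'd']), ([' ', 'o', 'r', ' '], ['o', 'r'])]

-- Source B's inner for loop body: keep the earliest (first-listed on ties) find hit
def pvBestStep (rest : List Char) (best : Option (Int × List Char × List Char))
    (dt : List Char × List Char) : Option (Int × List Char × List Char) :=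
  let p := PySem.Chars.find rest dt.1
  if p = -1 then best
  else match best with
    | none => some (p, dt.1, dt.2)
    | some b => if p < b.1 then some (p, dt.1, dt.2) else best

def pvBestHit (rest : List Char) : Option (Int × List Char × List Char) :=
  pvDelims.foldl (pvBestStep rest) none

-- Source B's while loop: slice off the prefix before the leftmost delimiter, emit, jump past it
def pvBloop : Nat → List Char → List (List Char) → List (List Char)
  | 0, _, res => res
  | fuel + 1, rest, res =>
    match pvBestHit rest with
    | none => if rest = [] then res else res ++ [PySem.Chars.strip rest]
    | some (p, d, t) =>
      let pre := rest.take p.toNat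
      pvBloop fuel (rest.drop (p.toNat + d.length))
        ((if pre = [] then res else res ++ [PySem.Chars.strip pre]) ++ [t])

def split_out_brackets_alt (rule : String) : List String :=
  ((pvCommaPass (pvBloop (rule.toList.length + 1) rule.toList [])).filter (· ≠ [])).map String.ofList

-- ===== PRECONDITION & SPEC =====
def Spec_split_out_brackets (rule : String) (out : List String) : Prop := out = split_out_brackets_alt rule
instance (rule : String) (out : List String) : Decidable (Spec_split_out_brackets rule out) := by unfold Spec_split_out_brackets; infer_instance

-- ===== CLAIM (what is proved, stated in full; the proofs are below) =====
def Claim_equal_split_out_brackets : Prop := ∀ (rule : String), Dom_split_out_brackets rule → Spec_split_out_brackets rule (split_out_brackets rule)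

-- ===== LEMMAS AND PROOFS =====

def pvInv (s : List Char) (P : List (List Char × List Char)) :
    Option (Int × List Char × List Char) → Prop
  | none => ∀ dt ∈ P, PySem.Chars.find s dt.1 = -1
  | some (p, d, t) =>
      PySem.Chars.find s d = p ∧ p ≠ -1 ∧
      ∃ P1 P2, P = P1 ++ (d, t) :: P2 ∧
        (∀ dt ∈ P1, PySem.Chars.find s dt.1 = -1 ∨ p < PySem.Chars.find s dt.1) ∧
        (∀ dt ∈ P2, PySem.Chars.find s dt.1 = -1 ∨ p ≤ PySem.Chars.find s dt.1)

lemma pvInv_step (s : List Char) (P : List (List Char × List Char)) (best) (dt)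
    (h : pvInv s P best) : pvInv s (P ++ [dt]) (pvBestStep s best dt) := by
  rcases best with _ | ⟨p, d, t⟩
  · by_cases hp : PySem.Chars.find s dt.1 = -1
    · simp only [pvBestStep, hp, if_true]
      intro dt' hdt'
      rcases List.mem_append.1 hdt' with h1 | h1
      · exact h dt' h1
      · rw [List.mem_singleton.1 h1]; exact hp
    · simp only [pvBestStep, hp, if_false]
      exact ⟨rfl, hp, P, [], by simp, fun dt' hdt' => Or.inl (h dt' hdt'), by simp⟩
  · obtain ⟨hfd, hpne, P1, P2, hP, h1, h2⟩ := h
    by_cases hp : PySem.Chars.find s dt.1 = -1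
    · simp only [pvBestStep, hp, if_true]
      refine ⟨hfd, hpne, P1, P2 ++ [dt], by rw [hP]; simp, h1, ?_⟩
      intro dt' hdt'
      rcases List.mem_append.1 hdt' with hh | hh
      · exact h2 dt' hh
      · rw [List.mem_singleton.1 hh]; exact Or.inl hp
    · by_cases hlt : PySem.Chars.find s dt.1 < p
      · simp only [pvBestStep, hp, hlt, if_false, if_true]
        refine ⟨rfl, hp, P, [], by simp, ?_, by simp⟩
        intro dt' hdt'
        rw [hP] at hdt'
        rcases List.mem_append.1 hdt' with hh | hh
        · rcases h1 dt' hh with he | he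
          · exact Or.inl he
          · right; omega
        · rcases List.mem_cons.1 hh with he | he
          · right; rw [he]; rw [hfd]; exact hlt
          · rcases h2 dt' he with he2 | he2
            · exact Or.inl he2
            · right; omega
      · simp only [pvBestStep, hp, hlt, if_false]
        refine ⟨hfd, hpne, P1, P2 ++ [dt], by rw [hP]; simp, h1, ?_⟩
        intro dt' hdt'
        rcases List.mem_append.1 hdt' with hh | hh
        · exact h2 dt' hh
        · rw [List.mem_singleton.1 hh]; right; omega

lemma pvInv_fold (s : List Char) (L : List (List Char × List Char)) :
    ∀ P best, pvInv s P best → pvInv s (P ++ L) (L.foldl (pvBestStep s) best) := by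
  induction L with
  | nil => intro P best h; simpa using h
  | cons dt L ih =>
    intro P best h
    have := ih (P ++ [dt]) (pvBestStep s best dt) (pvInv_step s P best dt h)
    simpa [List.append_assoc] using this

lemma pvInv_bestHit (s : List Char) : pvInv s pvDelims (pvBestHit s) := by
  have := pvInv_fold s pvDelims [] none (by intro dt h; cases h)
  simpa [pvBestHit] using this

def pvHitAt (s : List Char) : Prop := ∃ dt ∈ pvDelims, dt.1 <+: s

def pvChoose (s : List Char) : Option (List Char × List Char) :=
  pvDelims.find? (fun dt => decide (dt.1 <+: s))

lemma pvFind_neg_one_no_prefix (s sub : List Char) (h : PySem.Chars.find s sub = -1) :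
    ∀ j, ¬ sub <+: s.drop j := by
  intro j hpre
  have hin : PySem.Chars.isIn sub s = true :=
    (PySem.Chars.exists_prefix_drop_iff_isIn sub s).mp ⟨j, hpre⟩
  have := (PySem.Chars.find_eq_neg_one_iff s sub).mp h
  exact this ((PySem.Chars.isIn_iff_infix sub s).mp hin)

lemma pvBestHit_none (s : List Char) (h : pvBestHit s = none) :
    ∀ j, ¬ pvHitAt (s.drop j) := by
  have hinv := pvInv_bestHit s
  rw [h] at hinv
  rintro j ⟨dt, hmem, hpre⟩
  exact pvFind_neg_one_no_prefix s dt.1 (hinv dt hmem) j hpre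

lemma pvBestHit_some (s : List Char) (p d t) (h : pvBestHit s = some (p, d, t)) :
    ∃ q : Nat, p = (q : Int) ∧ (∀ j < q, ¬ pvHitAt (s.drop j)) ∧
      pvChoose (s.drop q) = some (d, t) ∧ d <+: s.drop q := by
  have hinv := pvInv_bestHit s
  rw [h] at hinv
  obtain ⟨hfd, hpne, P1, P2, hP, h1, h2⟩ := hinv
  have hge : -1 ≤ PySem.Chars.find s d := PySem.Chars.neg_one_le_find s d
  have hp0 : 0 ≤ p := by omega
  refine ⟨p.toNat, by omega, ?_, ?_, ?_⟩
  · -- no hit before p.toNat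
    rintro j hj ⟨dt', hmem', hpre'⟩
    rw [hP] at hmem'
    have hle : PySem.Chars.find s dt'.1 = -1 ∨ p ≤ PySem.Chars.find s dt'.1 := by
      rcases List.mem_append.1 hmem' with hh | hh
      · rcases h1 dt' hh with he | he
        · exact Or.inl he
        · right; omega
      · rcases List.mem_cons.1 hh with he | he
        · right; rw [he, hfd]
        · exact h2 dt' he
    rcases hle with he | he
    · exact pvFind_neg_one_no_prefix s dt'.1 he j hpre'
    · have hnn : 0 ≤ PySem.Chars.find s dt'.1 := by omega
      have hspec := PySem.Chars.find_spec hnn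
      exact hspec.2 j (by omega) hpre'
  · -- pvChoose
    have hdp : d <+: s.drop p.toNat := by
      have := (PySem.Chars.find_spec (by omega : 0 ≤ PySem.Chars.find s d)).1
      rwa [hfd] at this
    show pvDelims.find? _ = _
    rw [hP, List.find?_append]
    have hnone : P1.find? (fun dt => decide (dt.1 <+: s.drop p.toNat)) = none := by
      rw [List.find?_eq_none]
      intro dt' hdt'
      simp only [decide_eq_true_eq]
      intro hpre'
      rcases h1 dt' hdt' with he | he
      · exact pvFind_neg_one_no_prefix s dt'.1 he _ hpre'
      · have hnn : 0 ≤ PySem.Chars.find s dt'.1 := by omega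
        exact (PySem.Chars.find_spec hnn).2 p.toNat (by omega) hpre'
    rw [hnone]
    simp [List.find?_cons_of_pos, hdp]
  · have := (PySem.Chars.find_spec (by omega : 0 ≤ PySem.Chars.find s d)).1
    rwa [hfd] at this

lemma pvAloop_buffer_step (c : Char) (rest buf : List Char) (res : List (List Char))
    (h : ¬ pvHitAt (c :: rest)) :
    pvAloop (c :: rest) buf res = pvAloop rest (buf ++ [c]) res := by
  rw [pvAloop]
  rw [if_neg, if_neg, if_neg]
  · intro heq
    exact h ⟨([' ', 'o', 'r', ' '], ['o', 'r']), by simp [pvDelims],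
      heq ▸ List.take_prefix 4 (c :: rest)⟩
  · intro heq
    exact h ⟨([' ', 'a', 'n', 'd', ' '], ['a', 'n', 'd']), by simp [pvDelims],
      heq ▸ List.take_prefix 5 (c :: rest)⟩
  · rintro (rfl | rfl)
    · exact h ⟨(['('], ['(']), by simp [pvDelims], ⟨rest, rfl⟩⟩
    · exact h ⟨([')'], [')']), by simp [pvDelims], ⟨rest, rfl⟩⟩

lemma pvAloop_buffer_run (q : Nat) : ∀ (rest buf : List Char) (res : List (List Char)),
    (∀ j < q, ¬ pvHitAt (rest.drop j)) →
    pvAloop rest buf res = pvAloop (rest.drop q) (buf ++ rest.take q) res := by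
  induction q with
  | zero => intro rest buf res _; simp
  | succ q ih =>
    intro rest buf res h
    cases rest with
    | nil => simp
    | cons c rest =>
      rw [pvAloop_buffer_step c rest buf res (h 0 (Nat.succ_pos q))]
      rw [ih rest (buf ++ [c]) res (fun j hj => h (j + 1) (by omega))]
      simp

lemma pvAloop_hit_step (s' buf res d t) (h : pvChoose s' = some (d, t)) :
    pvAloop s' buf res =
      pvAloop (s'.drop d.length) []
        ((if buf = [] then res else res ++ [PySem.Chars.strip buf]) ++ [t]) := by
  by_cases h1 : ['('] <+: s'
  · obtain ⟨u, rfl⟩ := h1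
    have hd : d = ['('] ∧ t = ['('] := by
      simp [pvChoose, pvDelims, List.cons_prefix_cons] at h
      tauto
    obtain ⟨rfl, rfl⟩ := hd
    show pvAloop ('(' :: u) buf res = _
    rw [pvAloop]
    simp
  · by_cases h2 : [')'] <+: s'
    · obtain ⟨u, rfl⟩ := h2
      have hd : d = [')'] ∧ t = [')'] := by
        simp [pvChoose, pvDelims, List.cons_prefix_cons] at h
        tauto
      obtain ⟨rfl, rfl⟩ := hd
      show pvAloop (')' :: u) buf res = _
      rw [pvAloop]
      simp
    · by_cases h3 : [' ', 'a', 'n', 'd', ' '] <+: s'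
      · obtain ⟨u, rfl⟩ := h3
        have hd : d = [' ', 'a', 'n', 'd', ' '] ∧ t = ['a', 'n', 'd'] := by
          simp [pvChoose, pvDelims, List.cons_prefix_cons] at h
          tauto
        obtain ⟨rfl, rfl⟩ := hd
        show pvAloop (' ' :: 'a' :: 'n' :: 'd' :: ' ' :: u) buf res = _
        rw [pvAloop]
        simp [List.take]
      · by_cases h4 : [' ', 'o', 'r', ' '] <+: s'
        · obtain ⟨u, rfl⟩ := h4
          have hd : d = [' ', 'o', 'r', ' '] ∧ t = ['o', 'r'] := by
            simp [pvChoose, pvDelims, List.cons_prefix_cons] at h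
            tauto
          obtain ⟨rfl, rfl⟩ := hd
          show pvAloop (' ' :: 'o' :: 'r' :: ' ' :: u) buf res = _
          rw [pvAloop]
          simp [List.take]
        · exfalso
          have hmem := List.mem_of_find?_eq_some h
          have hp := List.find?_some h
          simp only [decide_eq_true_eq] at hp
          simp only [pvDelims, List.mem_cons, List.not_mem_nil, or_false] at hmem
          rcases hmem with he | he | he | he <;> rw [Prod.mk.injEq] at he <;>
            obtain ⟨rfl, -⟩ := he
          · exact h1 hp
          · exact h2 hp
          · exact h3 hp
          · exact h4 hp

lemma pvMain : ∀ (fuel : Nat) (rest buf : List Char) (res : List (List Char)),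
    buf.length + rest.length < fuel →
    (∀ j < buf.length, ¬ pvHitAt ((buf ++ rest).drop j)) →
    pvAloop rest buf res = pvBloop fuel (buf ++ rest) res := by
  intro fuel
  induction fuel with
  | zero => intro rest buf res h _; omega
  | succ fuel ih =>
    intro rest buf res hlen hbuf
    rw [pvBloop]
    cases hb : pvBestHit (buf ++ rest) with
    | none =>
      have hnone := pvBestHit_none _ hb
      have hrun := pvAloop_buffer_run rest.length rest buf res (by
        intro j hj
        have := hnone (buf.length + j)
        rwa [List.drop_length_add_append] at this)
      rw [hrun]
      simp only [List.drop_length, List.take_length]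
      rw [pvAloop]
    | some pdt =>
      obtain ⟨p, d, t⟩ := pdt
      obtain ⟨q, rfl, hnolo, hchoose, hdpre⟩ := pvBestHit_some _ _ _ _ hb
      have hmem : (d, t) ∈ pvDelims := List.mem_of_find?_eq_some hchoose
      have hdlen : 1 ≤ d.length := by
        simp only [pvDelims, List.mem_cons, List.not_mem_nil, or_false] at hmem
        rcases hmem with he | he | he | he <;> rw [Prod.mk.injEq] at he <;>
          obtain ⟨rfl, -⟩ := he <;> simp
      have hqlen : q + d.length ≤ buf.length + rest.length := by
        obtain ⟨u, hu⟩ := hdpre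
        have := congrArg List.length hu
        simp [List.length_drop] at this
        omega
      have hqb : buf.length ≤ q := by
        by_contra hq
        exact hbuf q (by omega) ⟨(d, t), hmem, hdpre⟩
      have hrun := pvAloop_buffer_run (q - buf.length) rest buf res (by
        intro j hj
        have := hnolo (buf.length + j) (by omega)
        rwa [List.drop_length_add_append] at this)
      rw [hrun]
      have hdrop : rest.drop (q - buf.length) = (buf ++ rest).drop q := by
        conv_rhs => rw [(by omega : q = buf.length + (q - buf.length))]
        rw [List.drop_length_add_append]
      have htake : buf ++ rest.take (q - buf.length) = (buf ++ rest).take q := by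
        conv_rhs => rw [(by omega : q = buf.length + (q - buf.length))]
        rw [List.take_length_add_append]
      rw [← hdrop] at hchoose
      rw [pvAloop_hit_step _ _ _ _ _ hchoose]
      simp only [Int.toNat_natCast]
      rw [htake, hdrop, List.drop_drop]
      have := ih ((buf ++ rest).drop (q + d.length)) []
        ((if (buf ++ rest).take q = [] then res
          else res ++ [PySem.Chars.strip ((buf ++ rest).take q)]) ++ [t])
        (by simp [List.length_drop]; omega) (by simp)
      simpa using this

-- ===== VERDICT (by name: the statement is the Claim_ definition above) =====
theorem split_out_brackets_spec : Claim_equal_split_out_brackets := by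
  intro rule _
  unfold Spec_split_out_brackets split_out_brackets split_out_brackets_alt
  have := pvMain (rule.toList.length + 1) rule.toList [] [] (by simp) (by simp)
  rw [List.nil_append] at this
  rw [this]
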